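-- pv_equiv track=rewrite | github.com/PabloBaiocchi/colab | src/shared.py | firstLastDigit
-- ===== SOURCE A (Python) =====
-- def firstLastDigit(myString):
--   firstInstance=-1
--   lastInstance=-1
--   for i,c in enumerate(myString):
--     if c.isdigit():
--       if firstInstance<0:
--         firstInstance=i
--       else:
--         lastInstance=i
--   return firstInstance,lastInstance
-- ===== SOURCE B (Python) =====
-- def firstLastDigit(myString):
--   first = -1
--   for i, c in enumerate(myString):
--     if c.isdigit():
--       first = i
--       break
--   if first < 0:
--     return (-1, -1)
--   last = -1
--   for i in range(len(myString) - 1, first, -1):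
--     if myString[i].isdigit():
--       last = i
--       break
--   return (first, last)
-- ===== Notes on version B (the rewrite author's own statement) =====
-- stated objective: alternative
-- what changed: Replaces the single full accumulator pass with two early-exit scans: a forward scan that breaks at the first digit and a backward scan (stopping before that index) that breaks at the last digit, reproducing last=-1 for a lone digit.
import Mathlib
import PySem

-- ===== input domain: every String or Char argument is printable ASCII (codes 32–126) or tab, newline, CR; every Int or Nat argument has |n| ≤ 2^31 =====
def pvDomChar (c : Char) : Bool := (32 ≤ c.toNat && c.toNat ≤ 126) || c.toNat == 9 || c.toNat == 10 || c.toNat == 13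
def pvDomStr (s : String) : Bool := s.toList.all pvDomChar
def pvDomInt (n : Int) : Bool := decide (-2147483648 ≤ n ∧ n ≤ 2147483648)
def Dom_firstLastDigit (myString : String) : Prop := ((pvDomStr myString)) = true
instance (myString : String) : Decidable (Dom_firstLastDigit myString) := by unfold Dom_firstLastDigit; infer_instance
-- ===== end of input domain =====

-- B replaces A's single full accumulator pass by two early-exit scans (forward for the
-- first digit, backward — stopping before it — for the last).

-- ===== PORT A =====
-- A's 'for i,c in enumerate(myString)' loop carrying (firstInstance, lastInstance)
def pvALoop : List (Int × Char) → Int → Int → Int × Int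
  | [], f, l => (f, l)
  | (i, c) :: rest, f, l =>
    if PySem.Chars.isdigit c then
      if f < 0 then pvALoop rest i l else pvALoop rest f i
    else pvALoop rest f l

def firstLastDigit (myString : String) : Int × Int :=
  pvALoop (PySem.List.enumerate myString.toList 0) (-1) (-1)

-- ===== PORT B =====
-- forward scan with break: index of the first digit, -1 if none
def pvBFirst : List (Int × Char) → Int
  | [] => -1
  | (i, c) :: rest => if PySem.Chars.isdigit c then i else pvBFirst rest

-- backward scan with break over 'range(len-1, first, -1)'; indices are in range, default unused
def pvBLast (cs : List Char) : List Int → Int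
  | [] => -1
  | i :: rest => if PySem.Chars.isdigit (PySem.List.pyGetD cs i ' ') then i else pvBLast cs rest

-- 'if first < 0: return (-1,-1)' and the backward loop
def pvBAfter (cs : List Char) (n first : Int) : Int × Int :=
  if first < 0 then (-1, -1)
  else (first, pvBLast cs (PySem.List.pyRange (n - 1) first (-1)))

def firstLastDigit_alt (myString : String) : Int × Int :=
  pvBAfter myString.toList (PySem.Str.len myString)
    (pvBFirst (PySem.List.enumerate myString.toList 0))

-- ===== PRECONDITION & SPEC =====
def Spec_firstLastDigit (myString : String) (out : Int × Int) : Prop := out = firstLastDigit_alt myString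
instance (myString : String) (out : Int × Int) : Decidable (Spec_firstLastDigit myString out) := by unfold Spec_firstLastDigit; infer_instance

-- ===== CLAIM (what is proved, stated in full; the proofs are below) =====
def Claim_equal_firstLastDigit : Prop := ∀ (myString : String), Dom_firstLastDigit myString → Spec_firstLastDigit myString (firstLastDigit myString)

-- ===== LEMMAS AND PROOFS =====

-- reference accumulator for "index of the last digit, else acc"
def pvLastAux : List Char → Int → Int → Int
  | [], _, acc => acc
  | c :: t, j, acc => pvLastAux t (j + 1) (if PySem.Chars.isdigit c then j else acc)

theorem pvLastAux_append (t u : List Char) (j acc : Int) :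
    pvLastAux (t ++ u) j acc = pvLastAux u (j + t.length) (pvLastAux t j acc) := by
  induction t generalizing j acc with
  | nil => simp [pvLastAux]
  | cons c t ih => simp [pvLastAux, ih]; ring_nf

-- A's loop after the first digit has been found (f ≥ 0)
theorem pvALoop_found (t : List Char) (j f l : Int) (hf : 0 ≤ f) :
    pvALoop (PySem.List.enumerate t j) f l = (f, pvLastAux t j l) := by
  induction t generalizing j l with
  | nil => simp [PySem.List.enumerate_nil, pvALoop, pvLastAux]
  | cons c t ih =>
    rw [PySem.List.enumerate_cons]
    by_cases hd : PySem.Chars.isdigit c <;>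
      simp [pvALoop, hd, pvLastAux, not_lt.mpr hf, ih]

-- A's loop skips a digit-free prefix
theorem pvALoop_prefix (c : Char) (suf : List Char) (pre : List Char) (k : Int)
    (hpre : ∀ x ∈ pre, PySem.Chars.isdigit x = false) (hc : PySem.Chars.isdigit c = true) :
    pvALoop (PySem.List.enumerate (pre ++ c :: suf) k) (-1) (-1)
      = pvALoop (PySem.List.enumerate suf (k + pre.length + 1)) (k + pre.length) (-1) := by
  induction pre generalizing k with
  | nil => simp [PySem.List.enumerate_cons, pvALoop, hc]
  | cons x pre ih =>
    have hx := hpre x (List.mem_cons_self)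
    rw [List.cons_append, PySem.List.enumerate_cons]
    have hstep : pvALoop ((k, x) :: PySem.List.enumerate (pre ++ c :: suf) (k + 1)) (-1) (-1)
        = pvALoop (PySem.List.enumerate (pre ++ c :: suf) (k + 1)) (-1) (-1) := by
      simp [pvALoop, hx]
    have hL : (((x :: pre).length : Nat) : Int) = (pre.length : Int) + 1 := by simp
    have hB : k + 1 + (pre.length : Int) = k + ((pre.length : Int) + 1) := by ring
    rw [hstep, ih (k + 1) (fun y hy => hpre y (List.mem_cons_of_mem _ hy)), hL, hB]

theorem pvALoop_nodigit (t : List Char) (k : Int)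
    (h : ∀ x ∈ t, PySem.Chars.isdigit x = false) :
    pvALoop (PySem.List.enumerate t k) (-1) (-1) = (-1, -1) := by
  induction t generalizing k with
  | nil => simp [PySem.List.enumerate_nil, pvALoop]
  | cons c t ih =>
    have hc := h c (List.mem_cons_self)
    rw [PySem.List.enumerate_cons]
    simp [pvALoop, hc, ih _ (fun y hy => h y (List.mem_cons_of_mem _ hy))]

-- B's forward scan on a digit-free list
theorem pvBFirst_nodigit (t : List Char) (k : Int)
    (h : ∀ x ∈ t, PySem.Chars.isdigit x = false) :
    pvBFirst (PySem.List.enumerate t k) = -1 := by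
  induction t generalizing k with
  | nil => simp [PySem.List.enumerate_nil, pvBFirst]
  | cons c t ih =>
    have hc := h c (List.mem_cons_self)
    rw [PySem.List.enumerate_cons]
    simp [pvBFirst, hc, ih _ (fun y hy => h y (List.mem_cons_of_mem _ hy))]

-- B's forward scan finds the first digit
theorem pvBFirst_prefix (c : Char) (suf : List Char) (pre : List Char) (k : Int)
    (hpre : ∀ x ∈ pre, PySem.Chars.isdigit x = false) (hc : PySem.Chars.isdigit c = true) :
    pvBFirst (PySem.List.enumerate (pre ++ c :: suf) k) = k + pre.length := by
  induction pre generalizing k with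
  | nil => simp [PySem.List.enumerate_cons, pvBFirst, hc]
  | cons x pre ih =>
    have hx := hpre x (List.mem_cons_self)
    rw [List.cons_append, PySem.List.enumerate_cons]
    have hstep : pvBFirst ((k, x) :: PySem.List.enumerate (pre ++ c :: suf) (k + 1))
        = pvBFirst (PySem.List.enumerate (pre ++ c :: suf) (k + 1)) := by
      simp [pvBFirst, hx]
    have hL : (((x :: pre).length : Nat) : Int) = (pre.length : Int) + 1 := by simp
    have hB : k + 1 + (pre.length : Int) = k + ((pre.length : Int) + 1) := by ring
    rw [hstep, ih (k + 1) (fun y hy => hpre y (List.mem_cons_of_mem _ hy)), hL, hB]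

-- B's backward scan over range(f+k, f, -1) equals pvLastAux on the segment cs[f+1 .. f+k]
theorem pvBLast_segment (cs : List Char) (f : Int) (k : Nat) (hf : 0 ≤ f)
    (hk : f.toNat + 1 + k ≤ cs.length) :
    pvBLast cs (PySem.List.pyRange (f + k) f (-1))
      = pvLastAux ((cs.drop (f.toNat + 1)).take k) (f + 1) (-1) := by
  induction k with
  | zero => simp [PySem.List.pyRange_neg_one_eq_nil le_rfl, pvBLast, pvLastAux]
  | succ k ih =>
    have hidx : f.toNat + 1 + k < cs.length := by omega
    have h1 : f + ((k + 1 : Nat) : Int) = f + k + 1 := by push_cast; ring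
    rw [h1, PySem.List.pyRange_neg_one_cons (show f < f + k + 1 by omega),
        show f + (k : Int) + 1 - 1 = f + k by ring]
    have hseg : (cs.drop (f.toNat + 1)).take (k + 1)
        = (cs.drop (f.toNat + 1)).take k ++ [cs[f.toNat + 1 + k]] := by
      rw [List.take_add_one]
      simp [List.getElem?_drop, hidx]
    have hlen : ((cs.drop (f.toNat + 1)).take k).length = k := by
      rw [List.length_take, List.length_drop]; omega
    rw [hseg, pvLastAux_append, hlen]
    have hget : PySem.List.pyGetD cs (f + k + 1) ' ' = cs[f.toNat + 1 + k] := by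
      rw [PySem.List.pyGetD_eq_getElem cs ' ' (by omega) (by omega)]
      congr 1; omega
    simp only [pvBLast, pvLastAux, hget]
    by_cases hd : PySem.Chars.isdigit cs[f.toNat + 1 + k]
    · simp [hd]; ring
    · simp [hd, ih (by omega)]

-- ===== VERDICT (by name: the statement is the Claim_ definition above) =====
theorem firstLastDigit_spec : Claim_equal_firstLastDigit := by
  intro s _
  unfold Spec_firstLastDigit firstLastDigit firstLastDigit_alt
  by_cases hall : ∀ x ∈ s.toList, PySem.Chars.isdigit x = false
  · rw [pvALoop_nodigit _ 0 hall, pvBFirst_nodigit _ 0 hall]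
    simp [pvBAfter]
  · -- decompose the character list at its first digit
    have hdw : s.toList.dropWhile (fun c => !PySem.Chars.isdigit c) ≠ [] := by
      intro hnil
      apply hall
      intro x hx
      have hmem : x ∈ s.toList.takeWhile (fun c => !PySem.Chars.isdigit c) := by
        have h := List.takeWhile_append_dropWhile
          (p := fun c => !PySem.Chars.isdigit c) (l := s.toList)
        rw [hnil, List.append_nil] at h
        rw [h]; exact hx
      simpa using List.mem_takeWhile_imp hmem
    obtain ⟨c, suf, hsplit⟩ := List.exists_cons_of_ne_nil hdw
    have hcsplit : s.toList
        = s.toList.takeWhile (fun c => !PySem.Chars.isdigit c) ++ c :: suf := by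
      rw [← hsplit, List.takeWhile_append_dropWhile]
    have hprenod : ∀ x ∈ s.toList.takeWhile (fun c => !PySem.Chars.isdigit c),
        PySem.Chars.isdigit x = false := by
      intro x hx
      simpa using List.mem_takeWhile_imp hx
    have hcd : PySem.Chars.isdigit c = true := by
      have h1 := List.head_dropWhile_not
        (fun c => !PySem.Chars.isdigit c) (l := s.toList) hdw
      have h2 : (s.toList.dropWhile fun c => !PySem.Chars.isdigit c).head hdw = c := by
        simp [hsplit]
      rw [h2] at h1
      simpa using h1
    set pre := s.toList.takeWhile (fun c => !PySem.Chars.isdigit c) with hpredef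
    rw [PySem.Str.len_eq, hcsplit,
        pvALoop_prefix c suf pre 0 hprenod hcd,
        pvBFirst_prefix c suf pre 0 hprenod hcd,
        pvALoop_found suf (0 + pre.length + 1) (0 + pre.length) (-1) (by positivity)]
    simp only [zero_add]
    unfold pvBAfter
    rw [if_neg (by omega)]
    have hn : ((pre ++ c :: suf).length : Int) - 1 = (pre.length : Int) + (suf.length : Nat) := by
      simp [List.length_append]; ring
    rw [hn, pvBLast_segment (pre ++ c :: suf) (pre.length : Int) suf.length (by positivity)
          (by simp [List.length_append]; omega)]
    have hdrop : (((pre ++ c :: suf).drop ((pre.length : Int).toNat + 1)).take suf.length)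
        = suf := by
      simp
    rw [hdrop]
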